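-- pv_equiv track=rewrite | github.com/yunglele98/3Dreconstruction_KM | scripts/qa_params_gate.py | severity_for
-- ===== SOURCE A (Python) =====
-- def severity_for(reasons: list[str]) -> str:
--     if any(r.startswith("height_per_floor") for r in reasons):
--         return "high"
--     if any(r.startswith("floor_height_sum_mismatch") for r in reasons):
--         return "medium"
--     if any(r.startswith("deep_facade_analysis_not_dict") for r in reasons):
--         return "medium"
--     if any(r.startswith(("storefront_conflict", "invalid_bond", "invalid_dfa_bond",
--                          "malformed_hex", "invalid_accent_hex",
--                          "polychromatic_brick_not_dict")) for r in reasons):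
--         return "low"
--     return "low"
-- ===== SOURCE B (Python) =====
-- _RULES = [
--     ("height_per_floor", 2),
--     ("floor_height_sum_mismatch", 1),
--     ("deep_facade_analysis_not_dict", 1),
-- ]
-- _LABELS = ["low", "medium", "high"]
--
-- def severity_for(reasons: list[str]) -> str:
--     rank = 0
--     for r in reasons:
--         for prefix, level in _RULES:
--             if r.startswith(prefix):
--                 rank = max(rank, level)
--     return _LABELS[rank]
-- ===== Notes on version B (the rewrite author's own statement) =====
-- stated objective: simpler
-- what changed: Replaces four sequential any() scans (up to four passes over the list) with a single pass keeping a running maximum rank looked up in an ordered rule table; the final prefix group is dropped since it maps to the same 'low' as the default.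
import Mathlib
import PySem

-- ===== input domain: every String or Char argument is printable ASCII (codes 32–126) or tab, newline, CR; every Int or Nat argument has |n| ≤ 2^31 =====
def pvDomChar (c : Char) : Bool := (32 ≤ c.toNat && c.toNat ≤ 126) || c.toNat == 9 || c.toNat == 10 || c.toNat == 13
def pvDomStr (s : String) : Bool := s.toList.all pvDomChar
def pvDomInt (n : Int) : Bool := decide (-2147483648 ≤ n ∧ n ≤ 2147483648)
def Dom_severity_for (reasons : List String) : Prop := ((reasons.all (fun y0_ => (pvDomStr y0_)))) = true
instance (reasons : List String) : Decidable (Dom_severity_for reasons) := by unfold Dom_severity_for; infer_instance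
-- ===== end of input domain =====

-- B replaces A's four sequential any() scans by a single pass with a running maximum rank from an ordered rule table (objective: simpler).


-- ===== PORT A =====
def severity_for (reasons : List String) : String :=
  if reasons.any (fun r => PySem.Str.startswith r "height_per_floor") then "high"
  else if reasons.any (fun r => PySem.Str.startswith r "floor_height_sum_mismatch") then "medium"
  else if reasons.any (fun r => PySem.Str.startswith r "deep_facade_analysis_not_dict") then "medium"
  else if reasons.any (fun r =>
      PySem.Str.startswith r "storefront_conflict" || PySem.Str.startswith r "invalid_bond" ||
      PySem.Str.startswith r "invalid_dfa_bond" || PySem.Str.startswith r "malformed_hex" ||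
      PySem.Str.startswith r "invalid_accent_hex" || PySem.Str.startswith r "polychromatic_brick_not_dict")
    then "low"
  else "low"

-- ===== PORT B =====
def pvRules : List (String × Nat) :=
  [("height_per_floor", 2), ("floor_height_sum_mismatch", 1), ("deep_facade_analysis_not_dict", 1)]
def pvLabels : List String := ["low", "medium", "high"]

def severity_for_alt (reasons : List String) : String :=
  let rank := reasons.foldl
    (fun acc r => pvRules.foldl
      (fun a pl => if PySem.Str.startswith r pl.1 then max a pl.2 else a) acc) 0
  pvLabels.getD rank "low"

-- ===== PRECONDITION & SPEC =====
def Spec_severity_for (reasons : List String) (out : String) : Prop := out = severity_for_alt reasons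
instance (reasons : List String) (out : String) : Decidable (Spec_severity_for reasons out) := by unfold Spec_severity_for; infer_instance

-- ===== CLAIM (what is proved, stated in full; the proofs are below) =====
def Claim_equal_severity_for : Prop := ∀ (reasons : List String), Dom_severity_for reasons → Spec_severity_for reasons (severity_for reasons)

-- ===== LEMMAS AND PROOFS =====

-- the per-element step of B's fold, and its closed form
def pvStep (acc : Nat) (r : String) : Nat :=
  pvRules.foldl (fun a pl => if PySem.Str.startswith r pl.1 then max a pl.2 else a) acc

def pvG (r : String) : Nat :=
  if PySem.Str.startswith r "height_per_floor" then 2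
  else if PySem.Str.startswith r "floor_height_sum_mismatch" ||
          PySem.Str.startswith r "deep_facade_analysis_not_dict" then 1
  else 0

theorem pvStep_eq (acc : Nat) (r : String) : pvStep acc r = max acc (pvG r) := by
  unfold pvStep pvG pvRules
  simp only [List.foldl]
  split_ifs <;> simp_all <;> omega

theorem pvFold_eq (l : List String) (a : Nat) :
    l.foldl pvStep a =
      max a (if l.any (fun r => PySem.Str.startswith r "height_per_floor") then 2
        else if l.any (fun r => PySem.Str.startswith r "floor_height_sum_mismatch") then 1
        else if l.any (fun r => PySem.Str.startswith r "deep_facade_analysis_not_dict") then 1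
        else 0) := by
  induction l generalizing a with
  | nil => simp
  | cons r t ih =>
    rw [List.foldl_cons, pvStep_eq, ih]
    simp only [List.any_cons]
    unfold pvG
    by_cases h1 : PySem.Str.startswith r "height_per_floor" <;>
    by_cases h2 : PySem.Str.startswith r "floor_height_sum_mismatch" <;>
    by_cases h3 : PySem.Str.startswith r "deep_facade_analysis_not_dict" <;>
    simp only [h1, h2, h3, Bool.true_or, Bool.false_or, if_true, if_false,
      Bool.false_eq_true, Bool.or_self] <;> split_ifs <;> omega

-- ===== VERDICT (by name: the statement is the Claim_ definition above) =====
theorem severity_for_spec : Claim_equal_severity_for := by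
  intro reasons _
  show severity_for reasons = severity_for_alt reasons
  unfold severity_for severity_for_alt
  have h := pvFold_eq reasons 0
  unfold pvStep at h
  rw [h]
  by_cases h1 : reasons.any (fun r => PySem.Str.startswith r "height_per_floor") <;>
  by_cases h2 : reasons.any (fun r => PySem.Str.startswith r "floor_height_sum_mismatch") <;>
  by_cases h3 : reasons.any (fun r => PySem.Str.startswith r "deep_facade_analysis_not_dict") <;>
  simp only [h1, h2, h3, Bool.false_eq_true, if_true, if_false] <;> first | decide | (split_ifs <;> decide)
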